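-- pv_equiv track=rewrite | github.com/kaiteddy/garage-management-system | archive/old_scripts/extract_js.py | check_basic_syntax
-- ===== SOURCE A (Python) =====
-- def check_basic_syntax(js_content):
--     """Basic syntax checks"""
--     issues = []
--
--     # Check for unmatched braces
--     open_braces = js_content.count('{')
--     close_braces = js_content.count('}')
--     if open_braces != close_braces:
--         issues.append(f"Unmatched braces: {open_braces} open, {close_braces} close")
--
--     # Check for unmatched parentheses
--     open_parens = js_content.count('(')
--     close_parens = js_content.count(')')
--     if open_parens != close_parens:
--         issues.append(f"Unmatched parentheses: {open_parens} open, {close_parens} close")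
--
--     # Check for unmatched brackets
--     open_brackets = js_content.count('[')
--     close_brackets = js_content.count(']')
--     if open_brackets != close_brackets:
--         issues.append(f"Unmatched brackets: {open_brackets} open, {close_brackets} close")
--
--     # Look for common syntax errors
--     lines = js_content.split('\n')
--     for i, line in enumerate(lines, 1):
--         line = line.strip()
--         if line.endswith(',}') or line.endswith(',]'):
--             issues.append(f"Line {i}: Trailing comma before closing brace/bracket")
--         if line.count('"') % 2 != 0 and line.count("'") % 2 != 0:
--             issues.append(f"Line {i}: Unmatched quotes")
--
--     return issues
-- ===== SOURCE B (Python) =====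
-- def check_basic_syntax(js_content):
--     """Basic syntax checks via a single character-level state machine per line
--     (no library count/strip/endswith scans)."""
--     ob = cb = op = cp = obr = cbr = 0
--     per_line = []
--     for i, line in enumerate(js_content.split('\n'), 1):
--         dq = sq = False          # quote parities
--         prev = None              # previous character of the line
--         last_pair = None         # (predecessor, char) of the last non-space char
--         for ch in line:
--             if ch == '{':
--                 ob += 1
--             elif ch == '}':
--                 cb += 1
--             elif ch == '(':
--                 op += 1
--             elif ch == ')':
--                 cp += 1
--             elif ch == '[':
--                 obr += 1
--             elif ch == ']':
--                 cbr += 1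
--             elif ch == '"':
--                 dq = not dq
--             elif ch == "'":
--                 sq = not sq
--             if not ch.isspace():
--                 last_pair = (prev, ch)
--             prev = ch
--         if last_pair == (',', '}') or last_pair == (',', ']'):
--             per_line.append(f"Line {i}: Trailing comma before closing brace/bracket")
--         if dq and sq:
--             per_line.append(f"Line {i}: Unmatched quotes")
--     issues = []
--     if ob != cb:
--         issues.append(f"Unmatched braces: {ob} open, {cb} close")
--     if op != cp:
--         issues.append(f"Unmatched parentheses: {op} open, {cp} close")
--     if obr != cbr:
--         issues.append(f"Unmatched brackets: {obr} open, {cbr} close")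
--     issues.extend(per_line)
--     return issues
-- ===== Notes on version B (the rewrite author's own statement) =====
-- stated objective: alternative
-- what changed: A's library scans (six whole-string .count calls plus per-line strip/endswith/count checks) are replaced by an explicit character-level state machine run once over each line that maintains bracket counters, quote parities and the (predecessor, char) pair of the last non-space character, from which all messages are derived.
import Mathlib
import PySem

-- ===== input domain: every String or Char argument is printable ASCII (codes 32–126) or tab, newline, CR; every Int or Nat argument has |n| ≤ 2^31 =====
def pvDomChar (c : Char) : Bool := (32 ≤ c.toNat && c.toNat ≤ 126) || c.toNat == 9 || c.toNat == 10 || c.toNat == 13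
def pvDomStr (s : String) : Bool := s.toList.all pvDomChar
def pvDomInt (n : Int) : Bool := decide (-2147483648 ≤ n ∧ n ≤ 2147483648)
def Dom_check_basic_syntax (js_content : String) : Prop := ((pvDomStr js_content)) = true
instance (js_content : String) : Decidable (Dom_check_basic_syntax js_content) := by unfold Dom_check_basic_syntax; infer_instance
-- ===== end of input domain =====

-- B replaces A's library scans (whole-string count, per-line strip/endswith/count) by a single
-- explicit character-level state machine run over each line (alternative decomposition, same result).

-- shared message formatters (the exact f-strings of both Pythons)
def pvMismatchMsg (label : String) (o c : Nat) : String :=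
  "Unmatched " ++ label ++ ": " ++ PySem.Int.toStr (o : Int) ++ " open, " ++ PySem.Int.toStr (c : Int) ++ " close"
def pvLineMsg (i : Nat) (what : String) : String :=
  "Line " ++ PySem.Int.toStr (i : Int) ++ ": " ++ what

-- ===== PORT A =====
def check_basic_syntax (js_content : String) : List String :=
  let s := js_content.toList
  let issues : List String := []
  let open_braces := PySem.Chars.count s ['{']
  let close_braces := PySem.Chars.count s ['}']
  let issues := if open_braces ≠ close_braces then issues ++ [pvMismatchMsg "braces" open_braces close_braces] else issues
  let open_parens := PySem.Chars.count s ['(']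
  let close_parens := PySem.Chars.count s [')']
  let issues := if open_parens ≠ close_parens then issues ++ [pvMismatchMsg "parentheses" open_parens close_parens] else issues
  let open_brackets := PySem.Chars.count s ['[']
  let close_brackets := PySem.Chars.count s [']']
  let issues := if open_brackets ≠ close_brackets then issues ++ [pvMismatchMsg "brackets" open_brackets close_brackets] else issues
  let lines := PySem.Chars.splitOn s ['\n']
  (lines.foldl (fun (st : Nat × List String) raw =>
      let i := st.1
      let issues := st.2
      let line := PySem.Chars.strip raw
      let issues := if PySem.Chars.endswith line [',', '}'] || PySem.Chars.endswith line [',', ']'] then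
          issues ++ [pvLineMsg i "Trailing comma before closing brace/bracket"] else issues
      let issues := if PySem.Chars.count line ['"'] % 2 ≠ 0 ∧ PySem.Chars.count line ['\''] % 2 ≠ 0 then
          issues ++ [pvLineMsg i "Unmatched quotes"] else issues
      (i + 1, issues)) (1, issues)).2

-- ===== PORT B =====
-- the character automaton's state: six bracket counters, two quote parities,
-- the previous character of the line, and (predecessor, char) of the last non-space char
def pvStep (s : (Nat × Nat × Nat × Nat × Nat × Nat) × Bool × Bool × Option Char × Option (Option Char × Char))
    (ch : Char) : (Nat × Nat × Nat × Nat × Nat × Nat) × Bool × Bool × Option Char × Option (Option Char × Char) :=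
  let c := s.1
  let dq := s.2.1
  let sq := s.2.2.1
  let prev := s.2.2.2.1
  let lp := s.2.2.2.2
  let cqs : (Nat × Nat × Nat × Nat × Nat × Nat) × Bool × Bool :=
    if ch = '{' then ((c.1 + 1, c.2.1, c.2.2.1, c.2.2.2.1, c.2.2.2.2.1, c.2.2.2.2.2), dq, sq)
    else if ch = '}' then ((c.1, c.2.1 + 1, c.2.2.1, c.2.2.2.1, c.2.2.2.2.1, c.2.2.2.2.2), dq, sq)
    else if ch = '(' then ((c.1, c.2.1, c.2.2.1 + 1, c.2.2.2.1, c.2.2.2.2.1, c.2.2.2.2.2), dq, sq)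
    else if ch = ')' then ((c.1, c.2.1, c.2.2.1, c.2.2.2.1 + 1, c.2.2.2.2.1, c.2.2.2.2.2), dq, sq)
    else if ch = '[' then ((c.1, c.2.1, c.2.2.1, c.2.2.2.1, c.2.2.2.2.1 + 1, c.2.2.2.2.2), dq, sq)
    else if ch = ']' then ((c.1, c.2.1, c.2.2.1, c.2.2.2.1, c.2.2.2.2.1, c.2.2.2.2.2 + 1), dq, sq)
    else if ch = '"' then (c, !dq, sq)
    else if ch = '\'' then (c, dq, !sq)
    else (c, dq, sq)
  let lp := if ¬ (PySem.Chars.isspace ch = true) then some (prev, ch) else lp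
  (cqs.1, cqs.2.1, cqs.2.2, some ch, lp)

def check_basic_syntax_alt (js_content : String) : List String :=
  let st := (PySem.Chars.splitOn js_content.toList ['\n']).foldl
    (fun (st : Nat × (Nat × Nat × Nat × Nat × Nat × Nat) × List String) line =>
      let i := st.1
      let c0 := st.2.1
      let per := st.2.2
      let fin := line.foldl pvStep (c0, false, false, none, none)
      let c := fin.1
      let dq := fin.2.1
      let sq := fin.2.2.1
      let lp := fin.2.2.2.2
      let per := if lp = some (some ',', '}') ∨ lp = some (some ',', ']') then
          per ++ [pvLineMsg i "Trailing comma before closing brace/bracket"] else per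
      let per := if dq = true ∧ sq = true then per ++ [pvLineMsg i "Unmatched quotes"] else per
      (i + 1, c, per))
    (1, (0, 0, 0, 0, 0, 0), [])
  let c := st.2.1
  let per := st.2.2
  let issues : List String := []
  let issues := if c.1 ≠ c.2.1 then issues ++ [pvMismatchMsg "braces" c.1 c.2.1] else issues
  let issues := if c.2.2.1 ≠ c.2.2.2.1 then issues ++ [pvMismatchMsg "parentheses" c.2.2.1 c.2.2.2.1] else issues
  let issues := if c.2.2.2.2.1 ≠ c.2.2.2.2.2 then issues ++ [pvMismatchMsg "brackets" c.2.2.2.2.1 c.2.2.2.2.2] else issues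
  issues ++ per

-- ===== PRECONDITION & SPEC =====
def Spec_check_basic_syntax (js_content : String) (out : List String) : Prop := out = check_basic_syntax_alt js_content
instance (js_content : String) (out : List String) : Decidable (Spec_check_basic_syntax js_content out) := by unfold Spec_check_basic_syntax; infer_instance

-- ===== CLAIM (what is proved, stated in full; the proofs are below) =====
def Claim_equal_check_basic_syntax : Prop := ∀ (js_content : String), Dom_check_basic_syntax js_content → Spec_check_basic_syntax js_content (check_basic_syntax js_content)

-- ===== LEMMAS AND PROOFS =====

-- the (predecessor, char) pair of the last non-space character, as a function of the line
def pvLP (prev : Option Char) (lp : Option (Option Char × Char)) (l : List Char) :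
    Option (Option Char × Char) :=
  match List.dropWhile PySem.Chars.isspace l.reverse with
  | [] => lp
  | c :: rest => some ((rest.head?).or prev, c)

-- the per-line messages, A-style and B-style
def pvLineIssuesA (i : Nat) (raw : List Char) : List String :=
  let line := PySem.Chars.strip raw
  (if PySem.Chars.endswith line [',', '}'] || PySem.Chars.endswith line [',', ']'] then
      [pvLineMsg i "Trailing comma before closing brace/bracket"] else []) ++
  (if PySem.Chars.count line ['"'] % 2 ≠ 0 ∧ PySem.Chars.count line ['\''] % 2 ≠ 0 then
      [pvLineMsg i "Unmatched quotes"] else [])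

def pvLineIssuesB (i : Nat) (raw : List Char) : List String :=
  (if pvLP none none raw = some (some ',', '}') ∨ pvLP none none raw = some (some ',', ']') then
      [pvLineMsg i "Trailing comma before closing brace/bracket"] else []) ++
  (if decide (raw.count '"' % 2 = 1) = true ∧ decide (raw.count '\'' % 2 = 1) = true then
      [pvLineMsg i "Unmatched quotes"] else [])

def pvPerLineA : Nat → List (List Char) → List String
  | _, [] => []
  | i, raw :: rest => pvLineIssuesA i raw ++ pvPerLineA (i + 1) rest

def pvPerLineB : Nat → List (List Char) → List String
  | _, [] => []
  | i, raw :: rest => pvLineIssuesB i raw ++ pvPerLineB (i + 1) rest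

-- single-character count is List.count
theorem pv_count_go_single (c : Char) : ∀ (fuel : Nat) (l : List Char) (acc : Nat),
    l.length ≤ fuel → PySem.Chars.count.go [c] fuel l acc = acc + l.count c := by
  intro fuel
  induction fuel with
  | zero => intro l acc h
            cases l with
            | nil => simp [PySem.Chars.count.go]
            | cons => simp at h
  | succ n ih =>
    intro l acc h
    cases l with
    | nil => simp [PySem.Chars.count.go]
    | cons x t =>
      simp only [PySem.Chars.count.go]
      by_cases hx : x = c
      · subst hx
        simp [List.isPrefixOf, ih t (acc + 1) (by simpa using h)]
        omega
      · have hpf : [c].isPrefixOf (x :: t) = false := by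
          simp [List.isPrefixOf]
          intro hc; exact absurd hc.symm hx
        simp [hpf, ih t acc (by simpa using h), hx]

theorem pv_count_single (l : List Char) (c : Char) :
    PySem.Chars.count l [c] = l.count c := by
  simp only [PySem.Chars.count, List.isEmpty_cons, Bool.false_eq_true, if_false]
  simpa using pv_count_go_single c l.length l 0 le_rfl

-- sum of per-part counts over splitOn equals the whole-string count (b ≠ separator)
theorem pv_splitOn_go_sum (b c : Char) (hbc : b ≠ c) :
    ∀ (fuel : Nat) (l cur : List Char) (acc : List (List Char)),
    l.length ≤ fuel →
    ((PySem.Chars.splitOn.go [c] fuel l cur acc).map (fun p => p.count b)).sum =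
      ((acc.map (fun p => p.count b)).sum + cur.count b + l.count b) := by
  intro fuel
  induction fuel with
  | zero =>
    intro l cur acc h
    cases l with
    | nil => simp [PySem.Chars.splitOn.go]
    | cons => simp at h
  | succ n ih =>
    intro l cur acc h
    cases l with
    | nil => simp [PySem.Chars.splitOn.go]
    | cons x t =>
      simp only [PySem.Chars.splitOn.go]
      by_cases hx : x = c
      · subst hx
        have hp : [x].isPrefixOf (x :: t) = true := by
          simp [List.isPrefixOf]
        simp only [hp, if_true]
        rw [show List.drop [x].length (x :: t) = t from rfl]
        rw [ih t [] (cur.reverse :: acc) (by simpa using h)]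
        simp [Ne.symm hbc]
        omega
      · have hp : [c].isPrefixOf (x :: t) = false := by
          simp [List.isPrefixOf]
          intro hc; exact absurd hc.symm hx
        simp only [hp, if_false, Bool.false_eq_true]
        rw [ih t (x :: cur) acc (by simpa using h)]
        simp [List.count_cons]
        omega

theorem pv_splitOn_sum (s : List Char) (b c : Char) (hbc : b ≠ c) :
    ((PySem.Chars.splitOn s [c]).map (fun p => p.count b)).sum = s.count b := by
  unfold PySem.Chars.splitOn
  rw [pv_splitOn_go_sum b c hbc (s.length + 1) s [] [] (by omega)]
  simp

theorem pv_parity_succ (n : Nat) : decide ((n + 1) % 2 = 1) = !decide (n % 2 = 1) := by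
  rcases Nat.mod_two_eq_zero_or_one n with h | h <;> simp [Nat.add_mod, h]

-- one automaton step, in closed form
theorem pvStep_eq (s : (Nat × Nat × Nat × Nat × Nat × Nat) × Bool × Bool × Option Char × Option (Option Char × Char)) (ch : Char) :
    pvStep s ch =
      ((s.1.1 + if ch = '{' then 1 else 0, s.1.2.1 + if ch = '}' then 1 else 0,
        s.1.2.2.1 + if ch = '(' then 1 else 0, s.1.2.2.2.1 + if ch = ')' then 1 else 0,
        s.1.2.2.2.2.1 + if ch = '[' then 1 else 0, s.1.2.2.2.2.2 + if ch = ']' then 1 else 0),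
       s.2.1 ^^ decide (ch = '"'), s.2.2.1 ^^ decide (ch = '\''),
       some ch,
       if PySem.Chars.isspace ch = true then s.2.2.2.2 else some (s.2.2.2.1, ch)) := by
  unfold pvStep
  simp only [ite_not]
  split_ifs <;> simp_all

theorem pvLP_append (prev : Option Char) (lp : Option (Option Char × Char)) (l : List Char) (a : Char) :
    pvLP prev lp (l ++ [a]) =
      if PySem.Chars.isspace a = true then pvLP prev lp l
      else some ((l.reverse.head?).or prev, a) := by
  by_cases ha : PySem.Chars.isspace a = true
  · simp [pvLP, ha]
  · simp only [pvLP, List.reverse_append, List.reverse_singleton, List.singleton_append,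
      List.dropWhile_cons, ha]
    simp

theorem pv_inner (l : List Char) :
    ∀ (c0 : Nat × Nat × Nat × Nat × Nat × Nat) (dq sq : Bool) (prev : Option Char)
      (lp : Option (Option Char × Char)),
    l.foldl pvStep (c0, dq, sq, prev, lp) =
      ((c0.1 + l.count '{', c0.2.1 + l.count '}', c0.2.2.1 + l.count '(',
        c0.2.2.2.1 + l.count ')', c0.2.2.2.2.1 + l.count '[', c0.2.2.2.2.2 + l.count ']'),
       dq ^^ decide (l.count '"' % 2 = 1), sq ^^ decide (l.count '\'' % 2 = 1),
       (l.reverse.head?).or prev, pvLP prev lp l) := by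
  induction l using List.reverseRecOn with
  | nil => intro c0 dq sq prev lp; simp [pvLP]
  | append_singleton l a ih =>
    intro c0 dq sq prev lp
    rw [List.foldl_append, ih]
    simp only [List.foldl_cons, List.foldl_nil]
    rw [pvStep_eq, pvLP_append]
    simp only [List.count_append, List.count_singleton, List.reverse_append,
      List.reverse_singleton, List.singleton_append, List.head?_cons, Prod.mk.injEq]
    refine ⟨⟨?_, ?_, ?_, ?_, ?_, ?_⟩, ?_, ?_, by simp [Option.or], ?_⟩
    · by_cases h : a = '{' <;> simp [h] <;> omega
    · by_cases h : a = '}' <;> simp [h] <;> omega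
    · by_cases h : a = '(' <;> simp [h] <;> omega
    · by_cases h : a = ')' <;> simp [h] <;> omega
    · by_cases h : a = '[' <;> simp [h] <;> omega
    · by_cases h : a = ']' <;> simp [h] <;> omega
    · by_cases h : a = '"' <;> simp [h, pv_parity_succ, Bool.xor_assoc]
    · by_cases h : a = '\'' <;> simp [h, pv_parity_succ, Bool.xor_assoc]
    · trivial

theorem pv_trailing (l : List Char) (x : Char) :
    (PySem.Chars.endswith (PySem.Chars.strip l) [',', x] = true ↔
      pvLP none none l = some (some ',', x)) := by
  have hc : PySem.Chars.isspace ',' = false := by decide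
  set l₁ := List.dropWhile PySem.Chars.isspace l with hl₁
  have hsplit : List.takeWhile PySem.Chars.isspace l ++ l₁ = l := List.takeWhile_append_dropWhile
  by_cases hnil : l₁ = []
  · -- all-whitespace line: both sides are false
    have hall : ∀ y ∈ l, PySem.Chars.isspace y = true := by
      rw [hl₁] at hnil; exact List.dropWhile_eq_nil_iff.mp hnil
    have hrev : List.dropWhile PySem.Chars.isspace l.reverse = [] := by
      rw [List.dropWhile_eq_nil_iff]; intro y hy; exact hall y (List.mem_reverse.mp hy)
    have hstrip : PySem.Chars.strip l = [] := by
      simp [PySem.Chars.strip, PySem.Chars.lstrip, PySem.Chars.rstrip, ← hl₁, hnil]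
    simp [hstrip, PySem.Chars.endswith, pvLP, hrev, List.isSuffixOf]
  · -- line with a non-space character
    have hD : List.dropWhile PySem.Chars.isspace l₁.reverse ≠ [] := by
      intro h
      have hall := List.dropWhile_eq_nil_iff.mp h
      cases hl : l₁ with
      | nil => exact hnil hl
      | cons z t =>
        have hz : ¬ (PySem.Chars.isspace z = true) := by
          have h2 := List.head?_dropWhile_not PySem.Chars.isspace l
          rw [← hl₁, hl] at h2
          simp only [List.head?_cons] at h2
          simp [h2]
        exact hz (hall z (by rw [← List.mem_reverse]; simp [hl]))
    set D := List.dropWhile PySem.Chars.isspace l₁.reverse with hDdef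
    have hstriprev : (PySem.Chars.strip l).reverse = D := by
      simp [PySem.Chars.strip, PySem.Chars.lstrip, PySem.Chars.rstrip, ← hl₁, hDdef]
    have hd : List.dropWhile PySem.Chars.isspace l.reverse =
        D ++ (List.takeWhile PySem.Chars.isspace l).reverse := by
      conv_lhs => rw [← hsplit]
      rw [List.reverse_append, List.dropWhile_append]
      simp [← hDdef, hD]
    have hwws : ∀ y ∈ (List.takeWhile PySem.Chars.isspace l).reverse, PySem.Chars.isspace y = true := by
      intro y hy; exact List.mem_takeWhile_imp (List.mem_reverse.mp hy)
    have hlp : pvLP none none l = some (some ',', x) ↔ [x, ','] <+: D := by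
      unfold pvLP
      rw [hd]
      cases hDc : D with
      | nil => exact absurd hDc hD
      | cons c rest =>
        simp only [List.cons_append, List.cons_prefix_cons, Option.some.injEq, Prod.mk.injEq]
        constructor
        · rintro ⟨h1, h2⟩
          refine ⟨h2.symm, ?_⟩
          -- head of rest ++ ws-pad is ',', and ',' is not whitespace, so rest starts with ','
          cases hrest : rest with
          | nil =>
            exfalso
            rw [hrest] at h1
            simp only [List.nil_append] at h1
            cases htk : (List.takeWhile PySem.Chars.isspace l).reverse with
            | nil => rw [htk] at h1; simp [Option.or] at h1
            | cons z zu =>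
              rw [htk] at h1
              simp [Option.or] at h1
              have hws := hwws z (by rw [htk]; simp)
              rw [h1] at hws
              rw [hws] at hc; cases hc
          | cons z zu =>
            rw [hrest] at h1
            simp [Option.or] at h1
            simp [List.cons_prefix_cons, h1]
        · rintro ⟨h1, h2⟩
          rcases h2 with ⟨t0, ht0⟩
          constructor
          · rw [← ht0]; simp [Option.or]
          · exact h1.symm
    rw [hlp, PySem.Chars.endswith_iff, ← hstriprev]
    constructor
    · intro h
      have h2 := List.reverse_prefix.mpr h
      simpa using h2
    · intro h
      have h2 : ([',', x] : List Char).reverse <+: (PySem.Chars.strip l).reverse := by simpa using h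
      exact List.reverse_prefix.mp h2

-- stripping whitespace does not change the count of a non-space character
theorem pv_count_strip (l : List Char) (q : Char) (hq : PySem.Chars.isspace q = false) :
    (PySem.Chars.strip l).count q = l.count q := by
  have haux : ∀ (m : List Char), (List.dropWhile PySem.Chars.isspace m).count q = m.count q := by
    intro m
    conv_rhs => rw [← List.takeWhile_append_dropWhile (p := PySem.Chars.isspace) (l := m)]
    rw [List.count_append]
    have : (List.takeWhile PySem.Chars.isspace m).count q = 0 := by
      rw [List.count_eq_zero]
      intro hmem
      have := List.mem_takeWhile_imp hmem
      rw [this] at hq; cases hq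
    omega
  calc (PySem.Chars.strip l).count q
      = ((PySem.Chars.strip l).reverse).count q := by rw [List.count_reverse]
    _ = l.count q := by
        simp only [PySem.Chars.strip, PySem.Chars.lstrip, PySem.Chars.rstrip, List.reverse_reverse]
        rw [haux, List.count_reverse, haux]

-- the two per-line checks agree
theorem pv_lineIssues_eq (i : Nat) (raw : List Char) : pvLineIssuesA i raw = pvLineIssuesB i raw := by
  unfold pvLineIssuesA pvLineIssuesB
  dsimp only
  have h1 : (PySem.Chars.endswith (PySem.Chars.strip raw) [',', '}'] ||
      PySem.Chars.endswith (PySem.Chars.strip raw) [',', ']']) = true ↔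
      (pvLP none none raw = some (some ',', '}') ∨ pvLP none none raw = some (some ',', ']')) := by
    rw [Bool.or_eq_true]
    rw [pv_trailing raw '}', pv_trailing raw ']']
  have h2 : (PySem.Chars.count (PySem.Chars.strip raw) ['"'] % 2 ≠ 0 ∧
      PySem.Chars.count (PySem.Chars.strip raw) ['\''] % 2 ≠ 0) ↔
      (decide (raw.count '"' % 2 = 1) = true ∧ decide (raw.count '\'' % 2 = 1) = true) := by
    rw [pv_count_single, pv_count_single, pv_count_strip raw '"' (by decide),
      pv_count_strip raw '\'' (by decide)]
    constructor
    · rintro ⟨a, b⟩; exact ⟨by simp; omega, by simp; omega⟩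
    · rintro ⟨a, b⟩; simp at a b; omega
  congr 1
  · by_cases h : (PySem.Chars.endswith (PySem.Chars.strip raw) [',', '}'] ||
        PySem.Chars.endswith (PySem.Chars.strip raw) [',', ']']) = true
    · rw [if_pos h, if_pos (h1.mp h)]
    · rw [if_neg h, if_neg (fun hb => h (h1.mpr hb))]
  · by_cases h : (PySem.Chars.count (PySem.Chars.strip raw) ['"'] % 2 ≠ 0 ∧
        PySem.Chars.count (PySem.Chars.strip raw) ['\''] % 2 ≠ 0)
    · rw [if_pos h, if_pos (h2.mp h)]
    · rw [if_neg h, if_neg (fun hb => h (h2.mpr hb))]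

theorem pv_perLine_eq (lines : List (List Char)) : ∀ i, pvPerLineA i lines = pvPerLineB i lines := by
  induction lines with
  | nil => intro i; rfl
  | cons raw rest ih =>
    intro i
    simp [pvPerLineA, pvPerLineB, pv_lineIssues_eq, ih]

-- A's line loop appends exactly pvPerLineA
theorem pv_foldA (lines : List (List Char)) : ∀ (i : Nat) (issues : List String),
    (lines.foldl (fun (st : Nat × List String) raw =>
      let i := st.1
      let issues := st.2
      let line := PySem.Chars.strip raw
      let issues := if PySem.Chars.endswith line [',', '}'] || PySem.Chars.endswith line [',', ']'] then
          issues ++ [pvLineMsg i "Trailing comma before closing brace/bracket"] else issues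
      let issues := if PySem.Chars.count line ['"'] % 2 ≠ 0 ∧ PySem.Chars.count line ['\''] % 2 ≠ 0 then
          issues ++ [pvLineMsg i "Unmatched quotes"] else issues
      (i + 1, issues)) (i, issues)).2 = issues ++ pvPerLineA i lines := by
  induction lines with
  | nil => intro i issues; simp [pvPerLineA]
  | cons raw rest ih =>
    intro i issues
    simp only [List.foldl_cons]
    rw [ih]
    simp [pvPerLineA, pvLineIssuesA]
    split_ifs <;> simp

-- B's line loop totals the per-line counts and appends exactly pvPerLineB
theorem pv_foldB (lines : List (List Char)) :
    ∀ (i ob cb op cp obr cbr : Nat) (per : List String),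
    (lines.foldl
      (fun (st : Nat × (Nat × Nat × Nat × Nat × Nat × Nat) × List String) line =>
        let i := st.1
        let c0 := st.2.1
        let per := st.2.2
        let fin := line.foldl pvStep (c0, false, false, none, none)
        let c := fin.1
        let dq := fin.2.1
        let sq := fin.2.2.1
        let lp := fin.2.2.2.2
        let per := if lp = some (some ',', '}') ∨ lp = some (some ',', ']') then
            per ++ [pvLineMsg i "Trailing comma before closing brace/bracket"] else per
        let per := if dq = true ∧ sq = true then per ++ [pvLineMsg i "Unmatched quotes"] else per
        (i + 1, c, per))
      (i, (ob, cb, op, cp, obr, cbr), per)) =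
      (i + lines.length,
        (ob + (lines.map (fun p => p.count '{')).sum,
         cb + (lines.map (fun p => p.count '}')).sum,
         op + (lines.map (fun p => p.count '(')).sum,
         cp + (lines.map (fun p => p.count ')')).sum,
         obr + (lines.map (fun p => p.count '[')).sum,
         cbr + (lines.map (fun p => p.count ']')).sum),
        per ++ pvPerLineB i lines) := by
  induction lines with
  | nil => intro i ob cb op cp obr cbr per; simp [pvPerLineB]
  | cons raw rest ih =>
    intro i ob cb op cp obr cbr per
    simp only [List.foldl_cons]
    rw [pv_inner]
    rw [ih]
    simp [pvPerLineB, pvLineIssuesB]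
    refine ⟨by omega, ⟨by omega, by omega, by omega, by omega, by omega, by omega⟩, ?_⟩
    split_ifs <;> simp_all

-- ===== VERDICT (by name: the statement is the Claim_ definition above) =====
theorem check_basic_syntax_spec : Claim_equal_check_basic_syntax := by
  intro js _
  unfold Spec_check_basic_syntax check_basic_syntax check_basic_syntax_alt
  simp only []
  rw [pv_foldA, pv_foldB]
  simp only [pv_splitOn_sum _ '{' '\n' (by decide), pv_splitOn_sum _ '}' '\n' (by decide),
    pv_splitOn_sum _ '(' '\n' (by decide), pv_splitOn_sum _ ')' '\n' (by decide),
    pv_splitOn_sum _ '[' '\n' (by decide), pv_splitOn_sum _ ']' '\n' (by decide),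
    pv_count_single, Nat.zero_add, pv_perLine_eq]
  split_ifs <;> simp
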